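-- pv_equiv track=rewrite | github.com/benquick123/code-profiling | code/batch-1/vse-naloge-brez-testov/DN6-M-159.py | custva
-- ===== SOURCE A (Python) =====
-- def unikati(s):
--     seznam = []
--     for i in s:
--         if i not in seznam:
--             seznam.append(i)
--     return seznam
--
-- def avtor(tvit):
--     return tvit.split(":")[0]
--
-- def se_zacne_z(tvit, c):
--     beseda = ""
--     seznam = []
--     pisi = False
--     for z in tvit:
--         if c == z:
--             pisi = True
--             continue
--         if pisi and z.isalnum():
--             beseda = beseda + z
--         elif pisi:
--             seznam.append(beseda)
--             pisi = False
--             beseda = ""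
--     if beseda != "":
--         seznam.append(beseda)
--
--     return seznam
--
-- def custva(tviti, hashtagi):
--     seznam = []
--     for tvit in tviti:
--         avt = avtor(tvit)
--         hash = se_zacne_z(tvit, "#")
--         for h in hash:
--             if h in hashtagi:
--                 seznam.append(avt)
--     seznam = sorted(unikati(seznam))
--     return seznam
-- ===== SOURCE B (Python) =====
-- def avtor(tvit):
--     return tvit.split(":")[0]
--
-- def se_zacne_z(tvit, c):
--     beseda = ""
--     seznam = []
--     pisi = False
--     for z in tvit:
--         if c == z:
--             pisi = True
--             continue
--         if pisi and z.isalnum():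
--             beseda = beseda + z
--         elif pisi:
--             seznam.append(beseda)
--             pisi = False
--             beseda = ""
--     if beseda != "":
--         seznam.append(beseda)
--     return seznam
--
-- def custva(tviti, hashtagi):
--     # build an inverted index: hashtag token -> set of authors using it
--     index = {}
--     for tvit in tviti:
--         avt = avtor(tvit)
--         for h in se_zacne_z(tvit, "#"):
--             index.setdefault(h, set()).add(avt)
--     avtorji = set()
--     for h in hashtagi:
--         avtorji |= index.get(h, set())
--     return sorted(avtorji)
-- ===== Notes on version B (the rewrite author's own statement) =====
-- stated objective: alternative
-- what changed: B builds an inverted index (hashtag token -> set of authors) in one pass over the tweets and then answers by unioning the index entries for the queried hashtags, instead of A's per-tweet per-token membership test with an append list deduplicated afterwards.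
import Mathlib
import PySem

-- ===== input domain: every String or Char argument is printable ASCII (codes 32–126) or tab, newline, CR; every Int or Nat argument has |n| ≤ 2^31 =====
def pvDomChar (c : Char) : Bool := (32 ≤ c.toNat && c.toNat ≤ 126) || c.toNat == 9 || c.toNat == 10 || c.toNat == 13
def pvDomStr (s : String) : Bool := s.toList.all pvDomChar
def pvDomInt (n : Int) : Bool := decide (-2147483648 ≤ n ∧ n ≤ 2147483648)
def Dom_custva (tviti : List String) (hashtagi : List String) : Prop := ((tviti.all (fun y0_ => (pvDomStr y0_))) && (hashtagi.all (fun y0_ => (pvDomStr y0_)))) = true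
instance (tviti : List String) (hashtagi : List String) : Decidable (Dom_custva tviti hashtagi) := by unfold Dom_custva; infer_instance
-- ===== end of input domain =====

-- B replaces A's per-tweet membership scan + quadratic dedup by an inverted index (token -> author set)
-- queried once per hashtag; same return value (alternative decomposition, no speed claim).

-- ===== PORT A =====
-- shared helpers (identical in both Pythons)
-- avtor: tvit.split(":")[0]; split with a nonempty separator always returns at least one piece, so [0] is headD ""
def pvAvtor (tvit : String) : String :=
  (((PySem.Str.split? tvit ":").getD []).headD "")  -- split? is none only for sep = ""

-- se_zacne_z: character loop with state (beseda, seznam, pisi), on List Char; exact (isalnum is ASCII-exact on Dom)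
def pvSeZacneZ (tvit : String) (c : Char) : List String :=
  let st := tvit.toList.foldl
    (fun (st : List Char × List (List Char) × Bool) z =>
      if c == z then (st.1, st.2.1, true)
      else if st.2.2 && PySem.Chars.isalnum z then (st.1 ++ [z], st.2.1, st.2.2)
      else if st.2.2 then ([], st.2.1 ++ [st.1], false)
      else st)
    ([], [], false)
  (if st.1 ≠ [] then st.2.1 ++ [st.1] else st.2.1).map String.ofList

def pvUnikati (s : List String) : List String :=
  s.foldl (fun seznam i => if i ∈ seznam then seznam else seznam ++ [i]) []

def custva (tviti : List String) (hashtagi : List String) : List String :=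
  let seznam := tviti.foldl
    (fun seznam tvit =>
      let avt := pvAvtor tvit
      let hash := pvSeZacneZ tvit '#'
      hash.foldl (fun seznam h => if h ∈ hashtagi then seznam ++ [avt] else seznam) seznam)
    []
  PySem.List.sorted (pvUnikati seznam) (fun x => x) false

-- ===== PORT B =====
def custva_alt (tviti : List String) (hashtagi : List String) : List String :=
  let index : PySem.Dict String (PySem.Set String) := tviti.foldl
    (fun d tvit =>
      let avt := pvAvtor tvit
      (pvSeZacneZ tvit '#').foldl
        (fun d h => d.insert h (PySem.Set.add (d.getD h PySem.Set.empty) avt)) d)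
    PySem.Dict.empty
  let avtorji := hashtagi.foldl
    (fun s h => PySem.Set.union s (index.getD h PySem.Set.empty)) PySem.Set.empty
  PySem.List.sorted avtorji (fun x => x) false

-- ===== PRECONDITION & SPEC =====
def Spec_custva (tviti : List String) (hashtagi : List String) (out : List String) : Prop := out = custva_alt tviti hashtagi
instance (tviti : List String) (hashtagi : List String) (out : List String) : Decidable (Spec_custva tviti hashtagi out) := by unfold Spec_custva; infer_instance

-- ===== CLAIM (what is proved, stated in full; the proofs are below) =====
def Claim_equal_custva : Prop := ∀ (tviti : List String) (hashtagi : List String), Dom_custva tviti hashtagi → Spec_custva tviti hashtagi (custva tviti hashtagi)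

-- ===== LEMMAS AND PROOFS =====

-- A's dedup helper is Python's set-of-list in first-occurrence order
theorem pvUnikati_eq_ofList (s : List String) : pvUnikati s = PySem.Set.ofList s := by
  have h : (fun (seznam : List String) i => if i ∈ seznam then seznam else seznam ++ [i])
      = PySem.Set.add := by
    funext acc i; exact (PySem.Set.add_eq_ite acc i).symm
  simp [pvUnikati, PySem.Set.ofList_eq_foldl, h]

-- membership in A's pre-sort list
theorem mem_seznamA (tviti hashtagi : List String) (a : String) :
    a ∈ tviti.foldl
      (fun seznam tvit =>
        (pvSeZacneZ tvit '#').foldl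
          (fun seznam h => if h ∈ hashtagi then seznam ++ [pvAvtor tvit] else seznam) seznam)
      [] ↔
    ∃ tvit ∈ tviti, pvAvtor tvit = a ∧ ∃ h ∈ pvSeZacneZ tvit '#', h ∈ hashtagi := by
  have step : ∀ (tvit : String) (acc : List String),
      (pvSeZacneZ tvit '#').foldl
        (fun seznam h => if h ∈ hashtagi then seznam ++ [pvAvtor tvit] else seznam) acc
      = acc ++ ((pvSeZacneZ tvit '#').filter (fun h => decide (h ∈ hashtagi))).map
          (fun _ => pvAvtor tvit) := by
    intro tvit acc
    exact PySem.List.foldl_append_ite (p := fun h => h ∈ hashtagi) (f := fun _ => pvAvtor tvit)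
      (l := pvSeZacneZ tvit '#') (acc := acc)
  rw [PySem.List.foldl_congr_mem _ _ (fun acc tvit =>
      acc ++ ((pvSeZacneZ tvit '#').filter (fun h => decide (h ∈ hashtagi))).map
        (fun _ => pvAvtor tvit)) [] (fun acc x _ => step x acc)]
  rw [PySem.List.foldl_append_eq_flatMap]
  simp only [List.nil_append, List.mem_flatMap, List.mem_map, List.mem_filter, decide_eq_true_eq]
  constructor
  · rintro ⟨t, ht, h, ⟨hh, hmem⟩, ha⟩; exact ⟨t, ht, ha, h, hh, hmem⟩
  · rintro ⟨t, ht, ha, h, hh, hmem⟩; exact ⟨t, ht, h, ⟨hh, hmem⟩, ha⟩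

-- the inner insert loop of B's index builder, per lookup
theorem mem_getD_inner (hs : List String) (avt : String)
    (d : PySem.Dict String (PySem.Set String)) (h a : String) :
    a ∈ (hs.foldl (fun d h => d.insert h (PySem.Set.add (d.getD h PySem.Set.empty) avt)) d).getD h
        PySem.Set.empty ↔
      a ∈ d.getD h PySem.Set.empty ∨ (h ∈ hs ∧ a = avt) := by
  induction hs generalizing d with
  | nil => simp
  | cons x xs ih =>
    simp only [List.foldl_cons, ih, PySem.Dict.getD_insert, List.mem_cons]
    by_cases hx : h = x
    · subst hx; simp [PySem.Set.mem_add]; tauto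
    · simp [hx]

-- B's index lookup, over all tweets
theorem mem_getD_index (tviti : List String) (d : PySem.Dict String (PySem.Set String))
    (h a : String) :
    a ∈ (tviti.foldl
        (fun d tvit =>
          (pvSeZacneZ tvit '#').foldl
            (fun d h => d.insert h (PySem.Set.add (d.getD h PySem.Set.empty) (pvAvtor tvit))) d)
        d).getD h PySem.Set.empty ↔
      a ∈ d.getD h PySem.Set.empty ∨
        ∃ tvit ∈ tviti, h ∈ pvSeZacneZ tvit '#' ∧ pvAvtor tvit = a := by
  induction tviti generalizing d with
  | nil => simp
  | cons t ts ih =>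
    simp only [List.foldl_cons, ih, mem_getD_inner]
    constructor
    · rintro (⟨hd | ⟨hh, ha⟩⟩ | ⟨u, hu, hh, ha⟩)
      · exact Or.inl hd
      · exact Or.inr ⟨t, List.mem_cons_self .., hh, ha.symm⟩
      · exact Or.inr ⟨u, List.mem_cons_of_mem _ hu, hh, ha⟩
    · rintro (hd | ⟨u, hu, hh, ha⟩)
      · exact Or.inl (Or.inl hd)
      · rcases List.mem_cons.mp hu with rfl | hu
        · exact Or.inl (Or.inr ⟨hh, ha.symm⟩)
        · exact Or.inr ⟨u, hu, hh, ha⟩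

-- the union loop over the queried hashtags
theorem mem_foldl_union (hashtagi : List String) (g : String → PySem.Set String)
    (s : PySem.Set String) (a : String) :
    a ∈ hashtagi.foldl (fun s h => PySem.Set.union s (g h)) s ↔
      a ∈ s ∨ ∃ h ∈ hashtagi, a ∈ g h := by
  induction hashtagi generalizing s with
  | nil => simp
  | cons x xs ih =>
    simp only [List.foldl_cons, ih, PySem.Set.mem_union, List.mem_cons]
    constructor
    · rintro (⟨hs | hg⟩ | ⟨h, hh, hg⟩)
      · exact Or.inl hs
      · exact Or.inr ⟨x, Or.inl rfl, hg⟩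
      · exact Or.inr ⟨h, Or.inr hh, hg⟩
    · rintro (hs | ⟨h, rfl | hh, hg⟩)
      · exact Or.inl (Or.inl hs)
      · exact Or.inl (Or.inr hg)
      · exact Or.inr ⟨h, hh, hg⟩

theorem nodup_foldl_union (hashtagi : List String) (g : String → PySem.Set String)
    (s : PySem.Set String) (hnd : s.Nodup) :
    (hashtagi.foldl (fun s h => PySem.Set.union s (g h)) s).Nodup := by
  induction hashtagi generalizing s with
  | nil => exact hnd
  | cons x xs ih => exact ih _ (PySem.Set.nodup_union _ _ hnd)

-- ===== VERDICT (by name: the statement is the Claim_ definition above) =====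
theorem custva_spec : Claim_equal_custva := by
  intro tviti hashtagi _
  unfold Spec_custva custva custva_alt
  apply PySem.List.sorted_eq_sorted_of_perm _ _ _ (fun _ _ h => h)
  rw [pvUnikati_eq_ofList]
  apply (List.perm_ext_iff_of_nodup (PySem.Set.nodup_ofList _)
    (nodup_foldl_union _ _ _ List.nodup_nil)).mpr
  intro a
  rw [PySem.Set.mem_ofList, mem_seznamA, mem_foldl_union]
  simp only [List.not_mem_nil, false_or, mem_getD_index, PySem.Dict.getD_empty]
  constructor
  · rintro ⟨t, ht, ha, h, hh, hmem⟩
    exact ⟨h, hmem, Or.inr ⟨t, ht, hh, ha⟩⟩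
  · rintro ⟨h, hmem, hempty | ⟨t, ht, hh, ha⟩⟩
    · simp [PySem.Set.empty] at hempty
    · exact ⟨t, ht, ha, h, hh, hmem⟩
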